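-- pv_equiv track=rewrite | github.com/IKAROSOO/CodingTest | Programmers/입문 100문제/120869_01.py | solution
-- ===== SOURCE A (Python) =====
-- def solution(spell, dic):
--     word_cnt = []
--
--     for word in dic:
--         cnt = 0
--
--         for spelling in spell:
--             if spelling in word:
--                 cnt += 1
--
--         word_cnt.append(cnt)
--
--     if max(word_cnt) == len(spell):
--         return 1
--     else:
--         return 2
-- ===== SOURCE B (Python) =====
-- def solution(spell, dic):
--     # Spell-major filtering: successively narrow the candidate word list,
--     # one spell element per pass; survivors contain every spell element.
--     candidates = dic
--     for s in spell:
--         candidates = [w for w in candidates if s in w]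
--     return 1 if candidates else 2
-- ===== Notes on version B (the rewrite author's own statement) =====
-- stated objective: faster
-- what changed: Inverts the iteration: instead of A's word-major nested loop that counts matched spell entries per word and compares the max to len(spell), B does a spell-major filtering pipeline that repeatedly narrows a candidate word list (one filter pass per spell element) and answers 1 iff any candidate survives; non-matching words drop out at the first failing pass, so most substring tests A performs are never executed.
-- crash fix: On empty dic A raises ValueError (max of empty sequence) while B returns 2. — e.g. on solution(["a"], []): A raises ValueError, B returns 2
import Mathlib
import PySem

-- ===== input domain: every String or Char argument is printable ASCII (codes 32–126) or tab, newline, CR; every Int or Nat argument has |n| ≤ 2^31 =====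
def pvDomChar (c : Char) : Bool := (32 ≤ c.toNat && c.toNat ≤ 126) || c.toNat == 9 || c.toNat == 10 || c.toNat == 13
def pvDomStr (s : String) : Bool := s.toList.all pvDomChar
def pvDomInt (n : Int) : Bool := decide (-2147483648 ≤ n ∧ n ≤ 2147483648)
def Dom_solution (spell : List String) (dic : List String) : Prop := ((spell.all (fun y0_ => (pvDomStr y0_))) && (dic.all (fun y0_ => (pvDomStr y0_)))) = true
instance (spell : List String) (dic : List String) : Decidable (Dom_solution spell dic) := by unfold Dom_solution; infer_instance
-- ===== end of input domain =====

-- B inverts A's iteration: a spell-major candidate-filtering pipeline instead of A's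
-- word-major count list + max/len comparison (objective: faster — measured); Pre_ excludes
-- empty dic, where A raises ValueError.


-- ===== PORT A =====
-- for word in dic: cnt = count of spell entries with 'spelling in word'; append; then max == len(spell)
def solution (spell : List String) (dic : List String) : Int :=
  -- word_cnt, built by append as in A, is inlined into the max() call
  match PySem.List.max? (dic.foldl
    (fun acc word =>
      acc ++ [spell.foldl (fun cnt spelling => if PySem.Str.isIn spelling word then cnt + 1 else cnt) (0 : Int)]) [])
    (fun x => x) with
  | some m => if m = (spell.length : Int) then 1 else 2
  | none => 0   -- Python raises ValueError here (empty dic); excluded by Pre_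

-- ===== PORT B =====
-- candidates = dic; for s in spell: candidates = [w for w in candidates if s in w]
def solution_alt (spell : List String) (dic : List String) : Int :=
  let candidates := spell.foldl (fun cand s => cand.filter (fun w => PySem.Str.isIn s w)) dic
  if candidates ≠ [] then 1 else 2

-- ===== PRECONDITION & SPEC =====
-- Pre_ excludes exactly dic = [], where Python A raises ValueError (max of empty sequence).
def Pre_solution (spell : List String) (dic : List String) : Prop := dic ≠ []
instance (spell : List String) (dic : List String) : Decidable (Pre_solution spell dic) := by unfold Pre_solution; infer_instance
def pvWitness_solution : List String × List String := (["a", "b"], ["cab", "x"])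

-- On empty dic A raises ValueError (max of empty sequence) while B returns 2.
def Raises_solution (spell : List String) (dic : List String) : Prop := dic = []
instance (spell : List String) (dic : List String) : Decidable (Raises_solution spell dic) := by unfold Raises_solution; infer_instance
def pvRaiseWitness_solution : List String × List String := (["a"], [])
def pvRaiseWitnessOut_solution : Int := 2

def Spec_solution (spell : List String) (dic : List String) (out : Int) : Prop := out = solution_alt spell dic
instance (spell : List String) (dic : List String) (out : Int) : Decidable (Spec_solution spell dic out) := by unfold Spec_solution; infer_instance

-- ===== CLAIM =====
def Claim_equal_solution : Prop := ∀ (spell : List String) (dic : List String), Dom_solution spell dic → Pre_solution spell dic → Spec_solution spell dic (solution spell dic)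
def Claim_raises_solution : Prop := (∀ (spell : List String) (dic : List String), Dom_solution spell dic → Raises_solution spell dic → ¬ Pre_solution spell dic) ∧ (Dom_solution (pvRaiseWitness_solution.1) (pvRaiseWitness_solution.2) ∧ Raises_solution (pvRaiseWitness_solution.1) (pvRaiseWitness_solution.2) ∧ solution_alt (pvRaiseWitness_solution.1) (pvRaiseWitness_solution.2) = pvRaiseWitnessOut_solution)

-- ===== LEMMAS AND PROOFS =====

-- A's inner loop counts the spell entries that occur in word.
lemma cnt_foldl (spell : List String) (w : String) (a : Int) :
    spell.foldl (fun cnt s => if PySem.Str.isIn s w then cnt + 1 else cnt) a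
      = a + (spell.countP (fun s => PySem.Str.isIn s w) : Int) := by
  induction spell generalizing a with
  | nil => simp
  | cons s t ih =>
    simp only [List.foldl_cons, List.countP_cons]
    rw [ih]
    split_ifs <;> push_cast <;> ring

-- B's filtering pipeline keeps exactly the words containing every spell entry.
lemma foldl_filter (spell : List String) (dic : List String) :
    spell.foldl (fun cand s => cand.filter (fun w => PySem.Str.isIn s w)) dic
      = dic.filter (fun w => spell.all (fun s => PySem.Str.isIn s w)) := by
  induction spell generalizing dic with
  | nil => simp
  | cons s t ih =>
    simp only [List.foldl_cons, ih, List.filter_filter, List.all_cons]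
    exact List.filter_congr (fun w _ => by rw [Bool.and_comm])

theorem solution_spec : Claim_equal_solution := by
  intro spell dic _ hpre
  unfold Spec_solution solution solution_alt
  simp only [foldl_filter]
  have hmap : dic.foldl
      (fun acc word =>
        acc ++ [spell.foldl (fun cnt spelling => if PySem.Str.isIn spelling word then cnt + 1 else cnt) (0 : Int)]) []
      = dic.map (fun w => (spell.countP (fun s => PySem.Str.isIn s w) : Int)) := by
    rw [PySem.List.foldl_append_singleton_eq_map]
    exact List.map_congr_left (fun w _ => by rw [cnt_foldl]; ring)
  rw [hmap]
  obtain ⟨w0, t, rfl⟩ : ∃ w0 t, dic = w0 :: t := by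
    cases dic with
    | nil => exact absurd rfl hpre
    | cons a b => exact ⟨a, b, rfl⟩
  obtain ⟨m, hm⟩ : ∃ m, PySem.List.max?
      ((w0 :: t).map (fun w => (spell.countP (fun s => PySem.Str.isIn s w) : Int))) (fun x => x) = some m := by
    cases h : PySem.List.max? ((w0 :: t).map (fun w => (spell.countP (fun s => PySem.Str.isIn s w) : Int))) (fun x => x) with
    | some m => exact ⟨m, rfl⟩
    | none => simp [PySem.List.max?_eq_none_iff] at h
  rw [hm]
  have hmem := PySem.List.max?_mem hm
  have hmax := PySem.List.max?_isMax hm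
  simp only [List.mem_map] at hmem
  obtain ⟨wm, hwm, hwmeq⟩ := hmem
  have hub : ∀ w, (spell.countP (fun s => PySem.Str.isIn s w) : Int) ≤ (spell.length : Int) := by
    intro w; exact_mod_cast List.countP_le_length
  -- m = len(spell) iff some word survives every filter pass
  have key : (m = (spell.length : Int)) ↔
      ((w0 :: t).filter (fun w => spell.all (fun s => PySem.Str.isIn s w)) ≠ []) := by
    rw [← List.isEmpty_eq_false_iff, List.isEmpty_eq_false_iff_exists_mem]
    constructor
    · intro hme
      have hc : spell.countP (fun s => PySem.Str.isIn s wm) = spell.length := by omega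
      refine ⟨wm, List.mem_filter.mpr ⟨hwm, ?_⟩⟩
      rw [List.all_eq_true]
      exact List.countP_eq_length.mp hc
    · rintro ⟨w, hw⟩
      obtain ⟨hwmem, hall⟩ := List.mem_filter.mp hw
      have hc : spell.countP (fun s => PySem.Str.isIn s w) = spell.length :=
        List.countP_eq_length.mpr (List.all_eq_true.mp hall)
      have h1 : (spell.countP (fun s => PySem.Str.isIn s w) : Int) ≤ m :=
        hmax _ (List.mem_map_of_mem (l := w0 :: t) hwmem)
      have h2 := hub wm
      omega
  simp only [key]

@[simp]
theorem solution_raises : Claim_raises_solution := by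
  unfold Claim_raises_solution
  exact ⟨fun spell dic _ hr hp => hp hr, by decide⟩
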